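-- pv_equiv track=rewrite | github.com/malikinss/portfolio | Python/Just Python/beegeek/Beegeek GenerationPy OOP/1/1_1_display_dart_board/1_1_display_dart_board.py | create_dart_board
-- ===== SOURCE A (Python) =====
-- def calculate_steps_to_edges(row: int, col: int, size: int) -> list[int]:
--     return [row, size + 1 - col, size + 1 - row, col]
--
-- def create_dart_board(size: int) -> list[list[int]]:
--     """
--     Creates a square dart board matrix with natural numbers arranged in
--     ascending order from the edges to the center.
--
--     Args:
--         size (int): The size of the dart board (side of the square matrix).
--
--     Returns:
--         list[list[int]]: The generated dart board matrix.
--     """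
--     board = []
--     for row in range(1, size + 1):
--         row_values = []
--         for col in range(1, size + 1):
--             # Calculate the minimum distance to the edge
--             min_distance = min(calculate_steps_to_edges(row, col, size))
--             row_values.append(min_distance)
--         board.append(row_values)
--     return board
-- ===== SOURCE B (Python) =====
-- def create_dart_board(size: int) -> list[list[int]]:
--     # Builds each row by concatenation instead of a per-cell minimum: a row at
--     # distance m from the nearest horizontal edge is the ramp 1..m-1, a plateau
--     # of m, then the ramp reversed.
--     board = []
--     for row in range(1, size + 1):
--         m = min(row, size + 1 - row)
--         ramp = list(range(1, m))
--         board.append(ramp + [m] * (size - 2 * (m - 1)) + ramp[::-1])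
--     return board
-- ===== Notes on version B (the rewrite author's own statement) =====
-- stated objective: alternative
-- what changed: B builds each row by concatenating a ramp 1..m-1, a plateau of m and the reversed ramp (m = the row's distance to the nearest horizontal edge), instead of computing a minimum of four distances per cell.
import Mathlib
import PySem

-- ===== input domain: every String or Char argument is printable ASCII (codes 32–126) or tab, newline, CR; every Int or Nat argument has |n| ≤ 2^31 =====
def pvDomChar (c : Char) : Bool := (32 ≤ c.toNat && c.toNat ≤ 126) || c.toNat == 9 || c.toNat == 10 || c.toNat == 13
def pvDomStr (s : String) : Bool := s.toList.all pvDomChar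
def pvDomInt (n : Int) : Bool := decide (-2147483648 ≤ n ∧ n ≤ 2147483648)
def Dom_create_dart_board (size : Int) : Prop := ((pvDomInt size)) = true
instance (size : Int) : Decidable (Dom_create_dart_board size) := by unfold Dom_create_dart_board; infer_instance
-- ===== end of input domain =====

-- B assembles each row by concatenation (ramp ++ plateau ++ reversed ramp) instead of
-- taking a minimum of four edge distances per cell (alternative algorithm, same cost).

-- ===== PORT A =====
def calculate_steps_to_edges (row col size : Int) : List Int :=
  [row, size + 1 - col, size + 1 - row, col]

-- min(<4-element literal list>) is always defined; Option.getD 0 is never the default branch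
def create_dart_board (size : Int) : List (List Int) :=
  (PySem.List.pyRange 1 (size + 1) 1).foldl (fun board row =>
    board ++ [(PySem.List.pyRange 1 (size + 1) 1).foldl (fun row_values col =>
      row_values ++ [(PySem.List.min? (calculate_steps_to_edges row col size) (fun x => x)).getD 0]) []]) []

-- ===== PORT B =====
-- '[m] * k' with possibly-negative k is Python's empty list, hence the .toNat;
-- 'ramp[::-1]' is ported as List.reverse.
def create_dart_board_alt (size : Int) : List (List Int) :=
  (PySem.List.pyRange 1 (size + 1) 1).foldl (fun board row =>
    let m := min row (size + 1 - row)
    let ramp := PySem.List.pyRange 1 m 1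
    board ++ [ramp ++ List.replicate (size - 2 * (m - 1)).toNat m ++ ramp.reverse]) []

-- ===== PRECONDITION & SPEC =====
def Spec_create_dart_board (size : Int) (out : List (List Int)) : Prop := out = create_dart_board_alt size
instance (size : Int) (out : List (List Int)) : Decidable (Spec_create_dart_board size out) := by unfold Spec_create_dart_board; infer_instance

-- ===== CLAIM (what is proved, stated in full; the proofs are below) =====
def Claim_equal_create_dart_board : Prop := ∀ (size : Int), Dom_create_dart_board size → Spec_create_dart_board size (create_dart_board size)

-- ===== LEMMAS AND PROOFS =====

-- A's per-cell value: min of the four-element list as a folded binary min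
theorem cell_min_eq (row col size : Int) :
    (PySem.List.min? (calculate_steps_to_edges row col size) (fun x => x)).getD 0
      = min (min (min row (size + 1 - col)) (size + 1 - row)) col := by
  rw [calculate_steps_to_edges, PySem.List.min?_id_cons]
  simp [List.foldl]

-- one row of A equals one row of B
theorem row_eq (size row : Int) (h1 : 1 ≤ row) (h2 : row ≤ size) :
    (PySem.List.pyRange 1 (size + 1) 1).map
        (fun col => min (min (min row (size + 1 - col)) (size + 1 - row)) col)
      = PySem.List.pyRange 1 (min row (size + 1 - row)) 1
          ++ List.replicate (size - 2 * (min row (size + 1 - row) - 1)).toNat (min row (size + 1 - row))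
          ++ (PySem.List.pyRange 1 (min row (size + 1 - row)) 1).reverse := by
  set m : Int := min row (size + 1 - row) with hm
  have hm1 : 1 ≤ m := by omega
  have hm2 : 2 * (m - 1) ≤ size - 1 := by omega
  apply List.ext_getElem
  · simp [PySem.List.length_pyRange_one]; omega
  · intro i hL hR
    have hi : (i : Int) < size := by
      simp [PySem.List.length_pyRange_one] at hL; omega
    simp only [List.getElem_map, PySem.List.getElem_pyRange_one, List.getElem_append,
      List.getElem_replicate, List.getElem_reverse, PySem.List.length_pyRange_one,
      List.length_append, List.length_replicate]
    split_ifs with hc1 hc2 <;> omega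

-- ===== VERDICT (by name: the statement is the Claim_ definition above) =====
theorem create_dart_board_spec : Claim_equal_create_dart_board := by
  intro size _
  unfold Spec_create_dart_board create_dart_board create_dart_board_alt
  rw [PySem.List.foldl_append_singleton_eq_map, PySem.List.foldl_append_singleton_eq_map]
  refine List.map_congr_left (fun row hrow => ?_)
  rw [PySem.List.foldl_append_singleton_eq_map]
  simp only [cell_min_eq]
  obtain ⟨ha, hb⟩ := PySem.List.mem_pyRange_one.mp hrow
  exact row_eq size row ha (by omega)
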